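-- pv_equiv track=rewrite | github.com/lelouedec/pgntopng | display_gamepgn.py | create_game_array
-- ===== SOURCE A (Python) =====
-- def create_game_array(gamestring):
--     game_array = gamestring.split(" ")
--     game_array2 = []
--     for i,val in enumerate(game_array):
--         if(i%3 !=0):
--             game_array2.append(val)
--
--     game = []
--     for i in range(0,len(game_array2),2):
--         if(i!=len(game_array2)-1):
--             game.append((game_array2[i],game_array2[i+1]))
--         else:
--             game.append((game_array2[i],"end"))
--
--     return game
-- ===== SOURCE B (Python) =====
-- def create_game_array(gamestring):
--     def pairs(toks):
--         if len(toks) < 2: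
--             return []
--         if len(toks) == 2:
--             return [(toks[1], "end")]
--         return [(toks[1], toks[2])] + pairs(toks[3:])
--     return pairs(gamestring.split(" "))
-- ===== Notes on version B (the rewrite author's own statement) =====
-- stated objective: simpler
-- what changed: Replaces A's two passes (filter out every third token into a new list, then pair that list by twos with an 'end' sentinel) with a single recursion over the raw token list in chunks of three, emitting the (white, black) pair of each chunk directly.
import Mathlib
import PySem

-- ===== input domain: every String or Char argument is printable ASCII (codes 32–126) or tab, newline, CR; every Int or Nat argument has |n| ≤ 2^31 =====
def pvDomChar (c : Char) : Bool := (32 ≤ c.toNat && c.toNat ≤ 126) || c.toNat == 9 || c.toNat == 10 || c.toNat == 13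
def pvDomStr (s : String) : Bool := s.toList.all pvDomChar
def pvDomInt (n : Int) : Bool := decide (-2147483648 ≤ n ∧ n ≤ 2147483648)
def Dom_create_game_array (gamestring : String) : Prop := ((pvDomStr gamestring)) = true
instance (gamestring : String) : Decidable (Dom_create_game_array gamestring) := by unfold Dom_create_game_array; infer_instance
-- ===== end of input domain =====

-- B replaces A's two passes (filter out every third token, then pair by twos) with one
-- recursion over the raw token list in chunks of three (objective: simpler).

-- ===== PORT A =====
def create_game_array (gamestring : String) : List (String × String) :=
  let game_array := (PySem.Str.split? gamestring " ").getD []   -- sep " " ≠ "", so split? is always some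
  let game_array2 := (PySem.List.enumerate game_array 0).foldl
      (fun acc iv => if iv.1 % 3 ≠ 0 then acc ++ [iv.2] else acc) []
  (PySem.List.pyRange 0 (PySem.List.len game_array2) 2).foldl
    (fun game i =>
      if i ≠ PySem.List.len game_array2 - 1 then
        game ++ [(PySem.List.pyGetD game_array2 i "", PySem.List.pyGetD game_array2 (i + 1) "")]
      else
        game ++ [(PySem.List.pyGetD game_array2 i "", "end")]) []

-- ===== PORT B =====
-- Source B's inner helper `pairs`: length < 2 → []; length = 2 → [(toks[1],"end")]; else (toks[1],toks[2]) :: pairs (toks[3:])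
def pairsB : List String → List (String × String)
  | [] => []
  | [_] => []
  | [_, a] => [(a, "end")]
  | _ :: a :: b :: rest => (a, b) :: pairsB rest

def create_game_array_alt (gamestring : String) : List (String × String) :=
  pairsB ((PySem.Str.split? gamestring " ").getD [])

-- ===== PRECONDITION & SPEC =====
def Spec_create_game_array (gamestring : String) (out : List (String × String)) : Prop := out = create_game_array_alt gamestring
instance (gamestring : String) (out : List (String × String)) : Decidable (Spec_create_game_array gamestring out) := by unfold Spec_create_game_array; infer_instance

-- ===== CLAIM (what is proved, stated in full; the proofs are below) =====
def Claim_equal_create_game_array : Prop := ∀ (gamestring : String), Dom_create_game_array gamestring → Spec_create_game_array gamestring (create_game_array gamestring)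

-- ===== LEMMAS AND PROOFS =====

-- what A's first loop (filter out indices ≡ 0 mod 3) computes, as a chunk-of-three recursion
def filt3 : List String → List String
  | [] => []
  | [_] => []
  | [_, a] => [a]
  | _ :: a :: b :: rest => a :: b :: filt3 rest

-- A's first loop with enumerate-offset s
def filtAux (s : Int) : List String → List String
  | [] => []
  | x :: xs => if s % 3 ≠ 0 then x :: filtAux (s + 1) xs else filtAux (s + 1) xs

lemma foldl_filt (xs : List String) (s : Int) (acc : List String) :
    (PySem.List.enumerate xs s).foldl
      (fun acc iv => if iv.1 % 3 ≠ 0 then acc ++ [iv.2] else acc) acc = acc ++ filtAux s xs := by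
  induction xs generalizing s acc with
  | nil => simp [PySem.List.enumerate_nil, filtAux]
  | cons x xs ih =>
      rw [PySem.List.enumerate_cons]
      simp only [List.foldl_cons, filtAux]
      by_cases h : s % 3 = 0
      · rw [if_neg (by simp [h]), if_neg (by simp [h]), ih]
      · rw [if_pos (by simp [h]), if_pos (by simp [h]), ih]
        simp

lemma filtAux_eq_filt3 (xs : List String) (s : Int) (hs : s % 3 = 0) :
    filtAux s xs = filt3 xs := by
  induction xs using filt3.induct generalizing s with
  | case1 => simp [filtAux, filt3]
  | case2 x => simp [filtAux, filt3, hs]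
  | case3 x a =>
      have h1 : (s + 1) % 3 ≠ 0 := by omega
      simp [filtAux, filt3, hs, h1]
  | case4 x a b rest ih =>
      have h1 : (s + 1) % 3 ≠ 0 := by omega
      have h2 : (s + 1 + 1) % 3 ≠ 0 := by omega
      have h3 : (s + 1 + 1 + 1) % 3 = 0 := by omega
      simp [filtAux, filt3, hs, h1, h2, ih _ h3]

-- pairing by twos with "end" on the odd tail: the second loop's result
def pairs2 : List String → List (String × String)
  | [] => []
  | [a] => [(a, "end")]
  | a :: b :: rest => (a, b) :: pairs2 rest

lemma pyRange_two_nil (a b : Int) (h : b ≤ a) : PySem.List.pyRange a b 2 = [] := by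
  rw [PySem.List.pyRange_of_pos _ _ (by norm_num)]
  simp [show ¬ a < b by omega]

lemma pyRange_two_cons (a b : Int) (h : a < b) :
    PySem.List.pyRange a b 2 = a :: PySem.List.pyRange (a + 2) b 2 := by
  rw [PySem.List.pyRange_of_pos _ _ (by norm_num), PySem.List.pyRange_of_pos _ _ (by norm_num)]
  have hN : ((b - a + 2 - 1) / 2).toNat
      = (if a + 2 < b then ((b - (a + 2) + 2 - 1) / 2).toNat else 0) + 1 := by
    split_ifs with h2 <;> omega
  rw [if_pos h, hN, List.range_succ_eq_map]
  simp [List.map_map, Function.comp_def]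
  intro k _
  ring

lemma getD_append_lt {α : Type} (pre l : List α) (k : Nat) (d : α) (hk : k < l.length) :
    (pre ++ l).getD (pre.length + k) d = l.getD k d := by
  rw [List.getD_eq_getElem?_getD, List.getD_eq_getElem?_getD, List.getElem?_append_right (by omega)]
  simp

lemma loopA (l pre : List String) (acc : List (String × String)) :
    (PySem.List.pyRange pre.length ((pre ++ l).length) 2).foldl
      (fun game i =>
        if i ≠ PySem.List.len (pre ++ l) - 1 then
          game ++ [(PySem.List.pyGetD (pre ++ l) i "", PySem.List.pyGetD (pre ++ l) (i + 1) "")]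
        else
          game ++ [(PySem.List.pyGetD (pre ++ l) i "", "end")]) acc
    = acc ++ pairs2 l := by
  induction l using pairs2.induct generalizing pre acc with
  | case1 =>
      rw [pyRange_two_nil _ _ (by simp)]
      simp [pairs2]
  | case2 a =>
      rw [pyRange_two_cons _ _ (by simp), pyRange_two_nil _ _ (by simp)]
      simp only [List.foldl_cons, List.foldl_nil, pairs2]
      have hlen : (pre.length : Int) = PySem.List.len (pre ++ [a]) - 1 := by
        simp [PySem.List.len_eq]
      rw [if_neg (by omega)]
      have : PySem.List.pyGetD (pre ++ [a]) (pre.length : Int) "" = a := by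
        rw [PySem.List.pyGetD_natCast]
        have := getD_append_lt pre [a] 0 "" (by simp)
        simpa using this
      rw [this]
  | case3 a b rest ih =>
      rw [pyRange_two_cons _ _ (by simp; omega)]
      simp only [List.foldl_cons]
      have hne : (pre.length : Int) ≠ PySem.List.len (pre ++ a :: b :: rest) - 1 := by
        simp [PySem.List.len_eq]; omega
      rw [if_pos hne]
      have hga : PySem.List.pyGetD (pre ++ a :: b :: rest) (pre.length : Int) "" = a := by
        rw [PySem.List.pyGetD_natCast]
        have := getD_append_lt pre (a :: b :: rest) 0 "" (by simp)
        simpa using this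
      have hgb : PySem.List.pyGetD (pre ++ a :: b :: rest) ((pre.length : Int) + 1) "" = b := by
        rw [show ((pre.length : Int) + 1) = ((pre.length + 1 : Nat) : Int) by push_cast; ring,
          PySem.List.pyGetD_natCast]
        have := getD_append_lt pre (a :: b :: rest) 1 "" (by simp)
        simpa using this
      rw [hga, hgb]
      have hre : pre ++ a :: b :: rest = (pre ++ [a, b]) ++ rest := by simp
      have hstart : (pre.length : Int) + 2 = ((pre ++ [a, b]).length : Int) := by
        push_cast [List.length_append, List.length_cons, List.length_nil]
        omega
      rw [hre, hstart, ih (pre ++ [a, b]) (acc ++ [(a, b)])]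
      simp [pairs2]

lemma pairs2_filt3 (toks : List String) : pairs2 (filt3 toks) = pairsB toks := by
  induction toks using filt3.induct with
  | case1 => simp [filt3, pairs2, pairsB]
  | case2 x => simp [filt3, pairs2, pairsB]
  | case3 x a => simp [filt3, pairs2, pairsB]
  | case4 x a b rest ih => simp [filt3, pairs2, pairsB, ih]

-- ===== VERDICT (by name: the statement is the Claim_ definition above) =====
theorem create_game_array_spec : Claim_equal_create_game_array := by
  intro gamestring _
  unfold Spec_create_game_array create_game_array create_game_array_alt
  set toks := (PySem.Str.split? gamestring " ").getD [] with htoks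
  simp only []
  rw [foldl_filt toks 0 [], List.nil_append, filtAux_eq_filt3 _ _ (by norm_num)]
  have := loopA (filt3 toks) [] []
  simp only [List.nil_append, List.length_nil, Nat.cast_zero] at this
  rw [← PySem.List.len_eq] at this
  rw [this, pairs2_filt3]
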